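-- pv_equiv track=rewrite | github.com/cjswo672/Algorithm_python | programmers/level3/숫자게임.py | solution
-- ===== SOURCE A (Python) =====
-- def solution(A, B):
--     if min(A) >= max(B): return 0
--     answer = 0
--     A = sorted(A)
--     B = sorted(B)
--     while A:    # 배열 순회가 더 빠름
--         curr = A.pop(0)
--         while B:
--             if B.pop(0) > curr:
--                 answer += 1
--                 break
--     return answer
-- ===== SOURCE B (Python) =====
-- def solution(A, B):
--     A = sorted(A)
--     i = 0
--     for b in sorted(B):
--         if i < len(A) and b > A[i]:
--             i += 1
--     return i
-- ===== Notes on version B (the rewrite author's own statement) =====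
-- stated objective: faster
-- what changed: Replaced the nested while loops with repeated pop(0) (each pop(0) is O(n)) by a single pass over sorted(B) advancing one index into sorted(A), so the matched count is the final index.
import Mathlib
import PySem

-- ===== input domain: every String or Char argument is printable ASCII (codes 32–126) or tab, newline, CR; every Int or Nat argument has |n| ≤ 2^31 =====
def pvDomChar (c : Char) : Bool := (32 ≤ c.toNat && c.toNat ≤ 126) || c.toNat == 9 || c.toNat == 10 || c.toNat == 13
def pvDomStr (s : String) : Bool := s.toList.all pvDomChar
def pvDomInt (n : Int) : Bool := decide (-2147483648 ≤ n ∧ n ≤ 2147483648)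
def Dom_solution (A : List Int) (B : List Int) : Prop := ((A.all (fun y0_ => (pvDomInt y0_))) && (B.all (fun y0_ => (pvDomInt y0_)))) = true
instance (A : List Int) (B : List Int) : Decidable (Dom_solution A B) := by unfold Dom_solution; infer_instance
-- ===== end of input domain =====

-- B replaces A's nested pop(0) loops by a single index walk over the sorted lists (same return value).

-- ===== PORT A =====
-- inner 'while B: if B.pop(0) > curr: answer += 1; break' — returns (answer, remaining B)
def pvInner (curr : Int) (answer : Int) : List Int → Int × List Int
  | [] => (answer, [])
  | b :: rest => if b > curr then (answer + 1, rest) else pvInner curr answer rest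

-- outer 'while A: curr = A.pop(0); …'
def pvOuter : List Int → List Int → Int → Int
  | [], _, answer => answer
  | a :: A', B, answer =>
      let p := pvInner a answer B
      pvOuter A' p.2 p.1

def solution (A : List Int) (B : List Int) : Int :=
  match PySem.List.min? A (fun x => x), PySem.List.max? B (fun x => x) with
  | some mA, some mB =>
      if mA ≥ mB then 0
      else pvOuter (PySem.List.sorted A (fun x => x) false)
                   (PySem.List.sorted B (fun x => x) false) 0
  | _, _ => 0   -- min/max of an empty list raises ValueError in Python: excluded by Pre_solution

-- ===== PORT B =====
-- 'if i < len(A) and b > A[i]: i += 1'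
def pvStep (As : List Int) (i : Int) (b : Int) : Int :=
  if i < (As.length : Int) then
    match PySem.List.pyGet? As i with
    | some a => if b > a then i + 1 else i
    | none => i
  else i

def solution_alt (A : List Int) (B : List Int) : Int :=
  let As := PySem.List.sorted A (fun x => x) false
  (PySem.List.sorted B (fun x => x) false).foldl (pvStep As) 0

-- ===== PRECONDITION & SPEC =====
-- Python's min(A)/max(B) raise ValueError on an empty list; exactly those inputs are excluded.
def Pre_solution (A : List Int) (B : List Int) : Prop := A ≠ [] ∧ B ≠ []
instance (A : List Int) (B : List Int) : Decidable (Pre_solution A B) := by unfold Pre_solution; infer_instance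
def pvWitness_solution : List Int × List Int := ([5, 1, 3], [2, 4, 2])

def Spec_solution (A : List Int) (B : List Int) (out : Int) : Prop := out = solution_alt A B
instance (A : List Int) (B : List Int) (out : Int) : Decidable (Spec_solution A B out) := by unfold Spec_solution; infer_instance

-- ===== CLAIM (what is proved, stated in full; the proofs are below) =====
def Claim_equal_solution : Prop := ∀ (A : List Int) (B : List Int), Dom_solution A B → Pre_solution A B → Spec_solution A B (solution A B)

-- ===== LEMMAS AND PROOFS =====

theorem pvOuter_nil_b (A : List Int) (ans : Int) : pvOuter A [] ans = ans := by
  induction A with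
  | nil => rfl
  | cons a A' ih => simpa [pvOuter, pvInner] using ih

-- The two state machines coincide: A's outer/inner loops on the suffix As.drop i of the
-- sorted A-list equal the B-side fold with index accumulator starting at i.
theorem pv_key (LB : List Int) : ∀ (As : List Int) (i : ℕ) (ans : Int),
    pvOuter (As.drop i) LB ans = ans + (LB.foldl (pvStep As) (i : Int) - i) := by
  induction LB with
  | nil =>
      intro As i ans
      simp [pvOuter_nil_b]
  | cons b B' ih =>
      intro As i ans
      cases h : As.drop i with
      | nil =>
          have hlen : As.length ≤ i := List.drop_eq_nil_iff.mp h
          have hstep : pvStep As (i : Int) b = (i : Int) := by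
            unfold pvStep
            rw [if_neg (by exact_mod_cast Nat.not_lt.mpr hlen)]
          have hih := ih As i ans
          rw [h] at hih
          simp only [pvOuter] at hih ⊢
          simp only [List.foldl_cons, hstep]
          omega
      | cons a rest =>
          have hget : PySem.List.pyGet? As (i : Int) = some a := by
            rw [PySem.List.pyGet?_natCast, ← List.head?_drop, h, List.head?_cons]
          have hlt : (i : Int) < (As.length : Int) := by
            have : i < As.length := by
              by_contra hc
              rw [List.drop_eq_nil_iff.mpr (by omega)] at h
              simp at h
            exact_mod_cast this
          have hrest : As.drop (i + 1) = rest := by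
            rw [← List.drop_drop, h]
            rfl
          by_cases hab : b > a
          · have lhs : pvOuter (a :: rest) (b :: B') ans = pvOuter rest B' (ans + 1) := by
              simp [pvOuter, pvInner, hab]
            have hstep : pvStep As (i : Int) b = (i : Int) + 1 := by
              unfold pvStep
              rw [if_pos hlt, hget]
              simp [hab]
            rw [lhs, ← hrest, ih As (i + 1) (ans + 1)]
            simp only [List.foldl_cons, hstep]
            push_cast
            omega
          · have lhs : pvOuter (a :: rest) (b :: B') ans = pvOuter (a :: rest) B' ans := by
              simp [pvOuter, pvInner, hab]
            have hstep : pvStep As (i : Int) b = (i : Int) := by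
              unfold pvStep
              rw [if_pos hlt, hget]
              simp [hab]
            rw [lhs, ← h, ih As i ans]
            simp only [List.foldl_cons, hstep]

theorem pv_fold_zero (As : List Int) (L : List Int) (h : ∀ b ∈ L, pvStep As 0 b = 0) :
    L.foldl (pvStep As) 0 = 0 := by
  induction L with
  | nil => rfl
  | cons b L' ih =>
      simp only [List.foldl_cons, h b (List.mem_cons_self ..)]
      exact ih (fun x hx => h x (List.mem_cons_of_mem _ hx))

-- ===== VERDICT (by name: the statement is the Claim_ definition above) =====
theorem solution_spec : Claim_equal_solution := by
  intro A B _ hpre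
  obtain ⟨hA, hB⟩ := hpre
  unfold Spec_solution solution
  obtain ⟨mA, hmA⟩ : ∃ m, PySem.List.min? A (fun x => x) = some m := by
    cases h : PySem.List.min? A (fun x => x) with
    | none => rw [PySem.List.min?_eq_none_iff] at h; exact absurd h hA
    | some m => exact ⟨m, rfl⟩
  obtain ⟨mB, hmB⟩ : ∃ m, PySem.List.max? B (fun x => x) = some m := by
    cases h : PySem.List.max? B (fun x => x) with
    | none => rw [PySem.List.max?_eq_none_iff] at h; exact absurd h hB
    | some m => exact ⟨m, rfl⟩
  rw [hmA, hmB]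
  show (if mA ≥ mB then (0 : Int)
        else pvOuter (PySem.List.sorted A (fun x => x) false)
                     (PySem.List.sorted B (fun x => x) false) 0) = solution_alt A B
  by_cases hge : mA ≥ mB
  · rw [if_pos hge]
    unfold solution_alt
    refine (pv_fold_zero _ _ (fun b hb => ?_)).symm
    -- every b ∈ B is ≤ mB ≤ mA ≤ head of sorted A, so the index never advances
    cases hs : PySem.List.sorted A (fun x => x) false with
    | nil =>
        have hperm := PySem.List.sorted_perm A (fun x => x) false
        rw [hs] at hperm
        exact absurd (List.perm_nil.mp hperm.symm) hA
    | cons a0 t =>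
        have ha0A : a0 ∈ A := by
          have hm : a0 ∈ PySem.List.sorted A (fun x => x) false := by
            rw [hs]; exact List.mem_cons_self ..
          rwa [PySem.List.mem_sorted] at hm
        have hbB : b ∈ B := by rwa [PySem.List.mem_sorted] at hb
        have h1 : b ≤ mB := PySem.List.max?_isMax hmB b hbB
        have h2 : mA ≤ a0 := PySem.List.min?_isMin hmA a0 ha0A
        unfold pvStep
        have hno : ¬ b > a0 := by omega
        simp [hno]
  · rw [if_neg hge]
    have := pv_key (PySem.List.sorted B (fun x => x) false)
      (PySem.List.sorted A (fun x => x) false) 0 0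
    simpa [solution_alt] using this
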